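-- pv_equiv track=rewrite | github.com/thinkerman/javascript-ds-and-algo | riversizes.py | find_first_double
-- ===== SOURCE A (Python) =====
-- def find_first_double(nums, n):  # ([1,2,2,2,3,3,3,4], 4)
--     idx = 0  # 0,1
--     while idx < len(nums):  # (0<9)=>True
--         num = nums[idx]  # 1
--         num_count = 0  # 0,1
--         # (0<9)and(1==1)=>True, (1<9)and(2==1)=>False
--         while idx < len(nums) and nums[idx] == num:
--             num_count += 1  # 1
--             idx += 1  # 1
--
--         if num_count == 2:
--             return num
--
--     return -1
-- ===== SOURCE B (Python) =====
-- def find_first_double(nums, n):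
--     # two-pass: build run-length encoding, then scan the runs
--     runs = []
--     for x in nums:
--         if runs and runs[-1][0] == x:
--             runs[-1][1] += 1
--         else:
--             runs.append([x, 1])
--     for val, cnt in runs:
--         if cnt == 2:
--             return val
--     return -1
-- ===== Notes on version B (the rewrite author's own statement) =====
-- stated objective: alternative
-- what changed: Replaced A's nested while-loops with manual index arithmetic by a two-pass algorithm: one fold building a run-length encoding of the list, then a scan of the runs for the first run of length exactly 2.
import Mathlib
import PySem

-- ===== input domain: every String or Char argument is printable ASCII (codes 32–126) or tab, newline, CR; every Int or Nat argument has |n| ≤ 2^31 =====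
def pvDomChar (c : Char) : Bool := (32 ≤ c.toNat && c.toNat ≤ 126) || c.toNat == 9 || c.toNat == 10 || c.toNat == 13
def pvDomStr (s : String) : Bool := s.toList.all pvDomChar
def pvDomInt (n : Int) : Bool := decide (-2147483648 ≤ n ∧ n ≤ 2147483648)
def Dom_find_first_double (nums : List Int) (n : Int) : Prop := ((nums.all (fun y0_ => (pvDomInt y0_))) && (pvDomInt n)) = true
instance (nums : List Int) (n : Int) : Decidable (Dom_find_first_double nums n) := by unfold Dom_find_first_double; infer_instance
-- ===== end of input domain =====

-- B replaces A's nested index-based while-loops by a two-pass algorithm: build a run-length encoding, then scan the runs (same asymptotic cost; a timing run measured B faster by a constant factor).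

-- ===== PORT A =====
-- inner while: 'while idx < len(nums) and nums[idx] == num: num_count += 1; idx += 1'
-- (fuel is only a totality guard; called with fuel ≥ nums.length - idx it never runs out)
def ffdInner (nums : List Int) (num : Int) (fuel : Nat) (idx : Nat) (cnt : Int) : Int × Nat :=
  match fuel with
  | 0 => (cnt, idx)
  | f + 1 =>
    if idx < nums.length ∧ nums[idx]! = num then ffdInner nums num f (idx + 1) (cnt + 1)
    else (cnt, idx)

-- outer while loop of A: 'num = nums[idx]' is inlined as nums[idx]!; fuel is a totality guard
def ffdOuter (nums : List Int) (fuel : Nat) (idx : Nat) : Int :=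
  match fuel with
  | 0 => -1
  | f + 1 =>
    if idx < nums.length then
      if (ffdInner nums nums[idx]! (nums.length - idx) idx 0).1 = 2 then nums[idx]!
      else ffdOuter nums f (ffdInner nums nums[idx]! (nums.length - idx) idx 0).2
    else -1

def find_first_double (nums : List Int) (n : Int) : Int := ffdOuter nums nums.length 0

-- ===== PORT B =====
-- one fold step of the RLE pass: extend the last run or append a new one
def rleStep (runs : List (Int × Int)) (x : Int) : List (Int × Int) :=
  match runs.getLast? with
  | some (v, c) => if v = x then runs.dropLast ++ [(v, c + 1)] else runs ++ [(x, 1)]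
  | none => [(x, 1)]

-- second pass: first run of length exactly 2
def scanRuns : List (Int × Int) → Int
  | [] => -1
  | (v, c) :: t => if c = 2 then v else scanRuns t

def find_first_double_alt (nums : List Int) (n : Int) : Int :=
  scanRuns (nums.foldl rleStep [])

-- ===== PRECONDITION & SPEC =====
def Spec_find_first_double (nums : List Int) (n : Int) (out : Int) : Prop := out = find_first_double_alt nums n
instance (nums : List Int) (n : Int) (out : Int) : Decidable (Spec_find_first_double nums n out) := by unfold Spec_find_first_double; infer_instance

-- ===== CLAIM (what is proved, stated in full; the proofs are below) =====
def Claim_equal_find_first_double : Prop := ∀ (nums : List Int) (n : Int), Dom_find_first_double nums n → Spec_find_first_double nums n (find_first_double nums n)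

-- ===== LEMMAS AND PROOFS =====

-- canonical front-grouping RLE, the bridge between the two programs
def rleRec : List Int → List (Int × Int)
  | [] => []
  | x :: t => (x, 1 + ((t.takeWhile (· == x)).length : Int)) :: rleRec (t.dropWhile (· == x))
termination_by l => l.length
decreasing_by simp [t.length_dropWhile_le]

-- continuing the fold with a pending last run (v, c)
def rleCont (v : Int) (c : Int) : List Int → List (Int × Int)
  | [] => [(v, c)]
  | x :: t => if v = x then rleCont v (c + 1) t else (v, c) :: rleCont x 1 t

theorem foldl_rleStep_eq_rleCont (l : List Int) (acc : List (Int × Int)) (v c : Int) :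
    List.foldl rleStep (acc ++ [(v, c)]) l = acc ++ rleCont v c l := by
  induction l generalizing acc v c with
  | nil => simp [rleCont]
  | cons x t ih =>
    simp only [List.foldl_cons, rleCont]
    have hstep : rleStep (acc ++ [(v, c)]) x =
        if v = x then acc ++ [(v, c + 1)] else (acc ++ [(v, c)]) ++ [(x, 1)] := by
      simp [rleStep]
    by_cases hvx : v = x
    · simp only [hstep, ih, if_pos hvx]
    · rw [hstep, if_neg hvx,
        show (acc ++ [(v, c)]) ++ [(x, 1)] = (acc ++ [(v, c)]) ++ [(x, 1)] from rfl,
        ih (acc ++ [(v, c)]) x 1]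
      simp [hvx]

theorem rleCont_eq (v : Int) (c : Int) (l : List Int) :
    rleCont v c l = (v, c + ((l.takeWhile (· == v)).length : Int)) :: rleRec (l.dropWhile (· == v)) := by
  induction l generalizing v c with
  | nil => simp [rleCont, rleRec]
  | cons x t ih =>
    by_cases hvx : v = x
    · subst hvx
      simp only [rleCont, ih, List.takeWhile_cons, List.dropWhile_cons,
        beq_self_eq_true, if_pos, List.length_cons]
      congr 2
      push_cast; ring
    · have hbx : (x == v) = false := by simp [beq_eq_false_iff_ne]; omega
      have h1 : (x :: t).takeWhile (· == v) = [] := by simp [List.takeWhile_cons, hbx]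
      have h2 : (x :: t).dropWhile (· == v) = x :: t := by simp [List.dropWhile_cons, hbx]
      rw [rleCont, if_neg hvx, h1, h2, ih x 1, rleRec]
      simp

theorem rle_eq (nums : List Int) : nums.foldl rleStep [] = rleRec nums := by
  cases nums with
  | nil => simp [rleRec]
  | cons x t =>
    have h := foldl_rleStep_eq_rleCont t ([] : List (Int × Int)) x 1
    simp only [List.nil_append] at h
    simp only [List.foldl_cons]
    have hx : rleStep [] x = [(x, 1)] := by simp [rleStep]
    rw [hx, h, rleCont_eq, rleRec]

-- the inner loop counts exactly the run of num at the front of (nums.drop idx)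
theorem ffdInner_spec (nums : List Int) (num : Int) (fuel idx : Nat) (cnt : Int)
    (hf : nums.length ≤ idx + fuel) :
    ffdInner nums num fuel idx cnt =
      (cnt + (((nums.drop idx).takeWhile (· == num)).length : Int),
       idx + ((nums.drop idx).takeWhile (· == num)).length) := by
  induction fuel generalizing idx cnt with
  | zero =>
    have : nums.drop idx = [] := List.drop_eq_nil_of_le (by omega)
    simp [ffdInner, this]
  | succ f ih =>
    rw [ffdInner]
    by_cases h : idx < nums.length ∧ nums[idx]! = num
    · obtain ⟨hlt, heq⟩ := h
      have hget : nums[idx]! = nums[idx] := getElem!_pos nums idx hlt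
      have hdrop : nums.drop idx = nums[idx] :: nums.drop (idx + 1) :=
        List.drop_eq_getElem_cons hlt
      rw [if_pos ⟨hlt, heq⟩, ih (idx + 1) (cnt + 1) (by omega), hdrop]
      rw [hget] at heq
      simp only [List.takeWhile_cons, heq, beq_self_eq_true, if_pos, List.length_cons,
        Prod.mk.injEq]
      refine ⟨by push_cast; ring, by omega⟩
    · rw [if_neg h]
      by_cases hlt : idx < nums.length
      · have heq : ¬ nums[idx]! = num := fun he => h ⟨hlt, he⟩
        have hget : nums[idx]! = nums[idx] := getElem!_pos nums idx hlt
        have hdrop : nums.drop idx = nums[idx] :: nums.drop (idx + 1) :=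
          List.drop_eq_getElem_cons hlt
        rw [hget] at heq
        rw [hdrop]
        simp [heq]
      · have : nums.drop idx = [] := List.drop_eq_nil_of_le (by omega)
        simp [this]

theorem drop_takeWhile_length (p : Int → Bool) (l : List Int) :
    l.drop (l.takeWhile p).length = l.dropWhile p := by
  induction l with
  | nil => rfl
  | cons x t ih =>
    by_cases hp : p x
    · simp [List.takeWhile_cons, List.dropWhile_cons, hp, ih]
    · simp [List.takeWhile_cons, List.dropWhile_cons, hp]

theorem ffdInner_top (nums : List Int) (idx : Nat) (hlt : idx < nums.length) :
    ffdInner nums nums[idx]! (nums.length - idx) idx 0 =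
      (1 + (((nums.drop (idx + 1)).takeWhile (· == nums[idx])).length : Int),
       idx + (1 + ((nums.drop (idx + 1)).takeWhile (· == nums[idx])).length)) := by
  have hget : nums[idx]! = nums[idx] := getElem!_pos nums idx hlt
  rw [ffdInner_spec nums nums[idx]! (nums.length - idx) idx 0 (by omega),
    List.drop_eq_getElem_cons hlt, hget]
  simp only [List.takeWhile_cons, beq_self_eq_true, if_pos, List.length_cons, Prod.mk.injEq]
  refine ⟨by push_cast; ring, by omega⟩

theorem rleRec_drop (nums : List Int) (idx : Nat) (hlt : idx < nums.length) :
    rleRec (nums.drop idx) =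
      (nums[idx], 1 + (((nums.drop (idx + 1)).takeWhile (· == nums[idx])).length : Int)) ::
        rleRec (nums.drop (idx + (1 + ((nums.drop (idx + 1)).takeWhile (· == nums[idx])).length))) := by
  have e : List.drop (idx + (1 + ((nums.drop (idx + 1)).takeWhile (· == nums[idx])).length)) nums
      = List.dropWhile (· == nums[idx]) (List.drop (idx + 1) nums) := by
    rw [← drop_takeWhile_length (· == nums[idx]) (List.drop (idx + 1) nums), List.drop_drop]
    congr 1
    omega
  rw [List.drop_eq_getElem_cons hlt, rleRec, e]

theorem ffdOuter_eq (nums : List Int) (fuel idx : Nat) (hf : nums.length ≤ idx + fuel) :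
    ffdOuter nums fuel idx = scanRuns (rleRec (nums.drop idx)) := by
  induction fuel generalizing idx with
  | zero =>
    have : nums.drop idx = [] := List.drop_eq_nil_of_le (by omega)
    simp [ffdOuter, this, rleRec, scanRuns]
  | succ f ih =>
    rw [ffdOuter]
    by_cases hlt : idx < nums.length
    · have hget : nums[idx]! = nums[idx] := getElem!_pos nums idx hlt
      have htop := ffdInner_top nums idx hlt
      rw [if_pos hlt, htop, rleRec_drop nums idx hlt]
      simp only [scanRuns]
      by_cases hc : (1 : Int) + (((nums.drop (idx + 1)).takeWhile (· == nums[idx])).length : Int) = 2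
      · rw [if_pos hc, if_pos hc, hget]
      · rw [if_neg hc, if_neg hc]
        exact ih (idx + (1 + ((nums.drop (idx + 1)).takeWhile (· == nums[idx])).length)) (by omega)
    · rw [if_neg hlt]
      have : nums.drop idx = [] := List.drop_eq_nil_of_le (by omega)
      simp [this, rleRec, scanRuns]

-- ===== VERDICT (by name: the statement is the Claim_ definition above) =====
theorem find_first_double_spec : Claim_equal_find_first_double := by
  intro nums n _
  unfold Spec_find_first_double find_first_double find_first_double_alt
  rw [rle_eq, ffdOuter_eq nums nums.length 0 (by omega)]
  simp
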